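-- pv_equiv track=rewrite | github.com/fivetran-jasonchletsos/jason_chletsos_ebay_lots | specifics_agent.py | infer_parallel
-- ===== SOURCE A (Python) =====
-- PARALLEL_TOKENS = [
--     "Silver Prizm", "Gold Prizm", "Black Prizm", "Red Prizm", "Blue Prizm",
--     "Green Prizm", "Orange Prizm", "Purple Prizm", "Pink Prizm", "White Prizm",
--     "Red Ice", "Blue Ice", "Gold Ice", "Black Ice", "Green Ice", "Purple Ice",
--     "Silver", "Gold", "Bronze", "Holo", "Holographic", "Refractor",
--     "Atomic Refractor", "X-Fractor", "Xfractor", "Superfractor",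
--     "Rainbow Foil", "Reverse Holo", "Cosmic", "Pulsar", "Hyper",
-- ]
--
-- def infer_parallel(title: str) -> tuple[str | None, str]:
--     """Find a parallel/variation. Longest match wins."""
--     t = title.lower()
--     matches = []
--     for tok in PARALLEL_TOKENS:
--         if tok.lower() in t:
--             matches.append(tok)
--     if not matches:
--         return None, "low"
--     matches.sort(key=len, reverse=True)
--     return matches[0], "high"
-- ===== SOURCE B (Python) =====
-- PARALLEL_TOKENS = [
--     "Silver Prizm", "Gold Prizm", "Black Prizm", "Red Prizm", "Blue Prizm",
--     "Green Prizm", "Orange Prizm", "Purple Prizm", "Pink Prizm", "White Prizm",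
--     "Red Ice", "Blue Ice", "Gold Ice", "Black Ice", "Green Ice", "Purple Ice",
--     "Silver", "Gold", "Bronze", "Holo", "Holographic", "Refractor",
--     "Atomic Refractor", "X-Fractor", "Xfractor", "Superfractor",
--     "Rainbow Foil", "Reverse Holo", "Cosmic", "Pulsar", "Hyper",
-- ]
--
-- def infer_parallel(title: str) -> tuple:
--     """Single pass keeping only the current longest match (strict '>' keeps
--     the earliest token on length ties, like the stable sort)."""
--     t = title.lower()
--     best = None
--     for tok in PARALLEL_TOKENS:
--         if tok.lower() in t and (best is None or len(tok) > len(best)):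
--             best = tok
--     return (best, "high") if best is not None else (None, "low")
-- ===== Notes on version B (the rewrite author's own statement) =====
-- stated objective: simpler
-- what changed: Replaced collect-all-matches then stable sort-by-length with a single pass that keeps only the current best token, using a strict greater-than length comparison so the earliest token wins length ties like the stable sort.
import Mathlib
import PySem

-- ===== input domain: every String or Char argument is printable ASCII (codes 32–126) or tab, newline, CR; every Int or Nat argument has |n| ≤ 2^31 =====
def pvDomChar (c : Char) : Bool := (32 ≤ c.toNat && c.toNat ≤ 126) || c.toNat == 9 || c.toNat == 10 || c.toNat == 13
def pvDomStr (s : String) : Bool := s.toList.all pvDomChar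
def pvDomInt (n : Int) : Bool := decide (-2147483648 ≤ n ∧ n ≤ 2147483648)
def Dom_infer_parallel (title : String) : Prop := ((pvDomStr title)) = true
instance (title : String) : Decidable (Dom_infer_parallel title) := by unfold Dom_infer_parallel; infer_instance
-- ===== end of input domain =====

-- B replaces A's collect-then-stable-sort with a single pass keeping the current best token (simpler; return value only).

def PARALLEL_TOKENS : List String := [
    "Silver Prizm", "Gold Prizm", "Black Prizm", "Red Prizm", "Blue Prizm",
    "Green Prizm", "Orange Prizm", "Purple Prizm", "Pink Prizm", "White Prizm",
    "Red Ice", "Blue Ice", "Gold Ice", "Black Ice", "Green Ice", "Purple Ice",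
    "Silver", "Gold", "Bronze", "Holo", "Holographic", "Refractor",
    "Atomic Refractor", "X-Fractor", "Xfractor", "Superfractor",
    "Rainbow Foil", "Reverse Holo", "Cosmic", "Pulsar", "Hyper"]

-- ===== PORT A =====
def infer_parallel (title : String) : Option String × String :=
  let t := PySem.Str.lower title
  let matches_ := PARALLEL_TOKENS.foldl
    (fun acc tok => if PySem.Str.isIn (PySem.Str.lower tok) t then acc ++ [tok] else acc) []
  if matches_ = [] then (none, "low")
  else ((PySem.List.sorted matches_ PySem.Str.len true).head?, "high")

-- ===== PORT B =====
def infer_parallel_alt (title : String) : Option String × String :=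
  let t := PySem.Str.lower title
  let best := PARALLEL_TOKENS.foldl
    (fun best tok =>
      if PySem.Str.isIn (PySem.Str.lower tok) t &&
         (match best with
          | none => true
          | some b => decide (PySem.Str.len b < PySem.Str.len tok))
      then some tok else best) none
  match best with
  | some b => (some b, "high")
  | none => (none, "low")

-- ===== PRECONDITION & SPEC =====
def Spec_infer_parallel (title : String) (out : Option String × String) : Prop := out = infer_parallel_alt title
instance (title : String) (out : Option String × String) : Decidable (Spec_infer_parallel title out) := by unfold Spec_infer_parallel; infer_instance

-- ===== CLAIM (what is proved, stated in full; the proofs are below) =====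
def Claim_equal_infer_parallel : Prop := ∀ (title : String), Dom_infer_parallel title → Spec_infer_parallel title (infer_parallel title)

-- ===== LEMMAS AND PROOFS =====

-- the single-pass "best" step, on an Option accumulator
def pvBestStep (best : Option String) (tok : String) : Option String :=
  if (match best with
      | none => true
      | some b => decide (PySem.Str.len b < PySem.Str.len tok))
  then some tok else best

-- A's collecting loop is filtering
theorem pv_foldl_filter (p : String → Bool) (xs : List String) (acc : List String) :
    xs.foldl (fun acc tok => if p tok then acc ++ [tok] else acc) acc = acc ++ xs.filter p := by
  induction xs generalizing acc with
  | nil => simp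
  | cons x t ih =>
    by_cases h : p x = true <;> simp [List.filter, h, ih]

-- head of a descending insertBy step is the best-step of the old head
theorem pv_head_insertBy (x : String) (acc : List String) :
    (PySem.List.insertBy (fun a b => decide (PySem.Str.len b < PySem.Str.len a)) x acc).head? =
    pvBestStep acc.head? x := by
  cases acc with
  | nil => simp [PySem.List.insertBy, pvBestStep]
  | cons h t =>
    by_cases hlt : h.length < x.length <;>
      simp [PySem.List.insertBy, pvBestStep, hlt]

-- head of the insertion-sort fold is the single-pass best fold
theorem pv_head_foldl_insertBy (xs : List String) (acc : List String) :
    (xs.foldl (fun a x => PySem.List.insertBy (fun a b => decide (PySem.Str.len b < PySem.Str.len a)) x a) acc).head? =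
    xs.foldl pvBestStep acc.head? := by
  induction xs generalizing acc with
  | nil => rfl
  | cons x t ih =>
    simp only [List.foldl_cons]
    rw [ih, pv_head_insertBy]

-- B's guarded step is: apply the best-step only on matching tokens
theorem pv_guard_step (p : String → Bool) :
    (fun (best : Option String) (tok : String) =>
        if p tok &&
           (match best with
            | none => true
            | some bb => decide (PySem.Str.len bb < PySem.Str.len tok))
        then some tok else best) =
    (fun best tok => if p tok then pvBestStep best tok else best) := by
  funext best tok
  by_cases h : p tok = true <;> simp [pvBestStep, h]

-- B's guarded fold over all tokens is the best fold over the matching ones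
theorem pv_foldl_guard (p : String → Bool) (xs : List String) (b : Option String) :
    xs.foldl (fun best tok => if p tok then pvBestStep best tok else best) b =
    (xs.filter p).foldl pvBestStep b := by
  induction xs generalizing b with
  | nil => rfl
  | cons x t ih =>
    by_cases h : p x = true <;> simp [h, List.foldl_cons, ih]

theorem pv_key : ∀ (title : String),
    infer_parallel title = infer_parallel_alt title := by
  intro title
  unfold infer_parallel infer_parallel_alt
  simp only []
  rw [pv_foldl_filter, pv_guard_step, pv_foldl_guard]
  simp only [List.nil_append]
  set p := fun tok => PySem.Str.isIn (PySem.Str.lower tok) (PySem.Str.lower title) with hp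
  set m := PARALLEL_TOKENS.filter p with hm
  have hsorted : (PySem.List.sorted m PySem.Str.len true).head? = m.foldl pvBestStep none := by
    rw [PySem.List.sorted_rev_eq_foldl_insertBy]
    exact pv_head_foldl_insertBy m []
  by_cases hnil : m = []
  · simp [hnil]
  · have hne : PySem.List.sorted m PySem.Str.len true ≠ [] := by
      simpa [PySem.List.sorted_eq_nil_iff] using hnil
    obtain ⟨h0, t0, ht⟩ := List.exists_cons_of_ne_nil hne
    have : m.foldl pvBestStep none = some h0 := by rw [← hsorted, ht]; rfl
    simp [hnil, ht, this]

-- ===== VERDICT (by name: the statement is the Claim_ definition above) =====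
theorem infer_parallel_spec : Claim_equal_infer_parallel := by
  intro title _
  unfold Spec_infer_parallel
  exact pv_key title
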